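-- pv_equiv track=rewrite | github.com/HorbachovV/talent_engine_python | task_5.py | partlist
-- ===== SOURCE A (Python) =====
-- def partlist(list_):
--     n = len(list_)
--     result = []
--     for i in range(1, n):
--         part1 = " ".join(list_[:i])
--         part2 = " ".join(list_[i:])
--         result.append((part1, part2))
--     return result
-- ===== SOURCE B (Python) =====
-- def partlist(list_):
--     if not list_:
--         return []
--     head, rest = list_[0], list_[1:]
--     # right-to-left pass: sufs[k] = " ".join(rest[k:]) built incrementally
--     sufs = []
--     acc = None
--     for x in reversed(rest):
--         acc = x if acc is None else x + " " + acc
--         sufs.append(acc)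
--     sufs.reverse()
--     # left-to-right pass: running prefix string
--     result = []
--     pre = head
--     for x, s in zip(rest, sufs):
--         result.append((pre, s))
--         pre = pre + " " + x
--     return result
-- ===== Notes on version B (the rewrite author's own statement) =====
-- stated objective: faster
-- what changed: A re-slices the list and re-joins both halves from scratch at every split point (quadratic work in total string size); B precomputes all suffix joins in one right-to-left pass and maintains a running prefix string in one left-to-right pass.
import Mathlib
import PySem

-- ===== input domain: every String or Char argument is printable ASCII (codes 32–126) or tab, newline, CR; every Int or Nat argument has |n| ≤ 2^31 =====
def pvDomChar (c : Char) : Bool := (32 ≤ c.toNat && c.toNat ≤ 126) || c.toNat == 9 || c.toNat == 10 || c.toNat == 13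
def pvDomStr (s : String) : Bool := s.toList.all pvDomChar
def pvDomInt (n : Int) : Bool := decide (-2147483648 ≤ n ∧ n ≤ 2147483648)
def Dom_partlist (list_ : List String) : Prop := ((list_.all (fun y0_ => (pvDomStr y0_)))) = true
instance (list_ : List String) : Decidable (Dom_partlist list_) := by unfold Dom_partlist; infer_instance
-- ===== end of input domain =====

-- B replaces A's per-index slice-and-join (rejoining both halves from scratch at every
-- split point) by one right-to-left pass precomputing all suffix joins plus one
-- left-to-right pass maintaining a running prefix string (objective: faster, constant-factor).

-- ===== PORT A =====
def partlist (list_ : List String) : List (String × String) :=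
  let n : Int := list_.length
  (PySem.List.pyRange 1 n 1).foldl (fun result i =>
    let part1 := PySem.Str.join " " (PySem.List.slice list_ none (some i))
    let part2 := PySem.Str.join " " (PySem.List.slice list_ (some i) none)
    result ++ [(part1, part2)]) []

-- ===== PORT B =====
-- right-to-left pass of Source B: pvSufs rest lists " ".join(rest[k:]) for each k
def pvSufs : List String → List String
  | [] => []
  | x :: rest =>
    match pvSufs rest with
    | [] => [x]
    | s :: ss => (x ++ " " ++ s) :: s :: ss

-- left-to-right pass of Source B: running prefix paired with the precomputed suffixes
def pvBuild : String → List String → List String → List (String × String)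
  | _, [], _ => []
  | _, _ :: _, [] => []
  | pre, x :: xs, s :: ss => (pre, s) :: pvBuild (pre ++ " " ++ x) xs ss

def partlist_alt (list_ : List String) : List (String × String) :=
  match list_ with
  | [] => []
  | head :: rest => pvBuild head rest (pvSufs rest)

-- ===== PRECONDITION & SPEC =====
def Spec_partlist (list_ : List String) (out : List (String × String)) : Prop := out = partlist_alt list_
instance (list_ : List String) (out : List (String × String)) : Decidable (Spec_partlist list_ out) := by unfold Spec_partlist; infer_instance

-- ===== CLAIM (what is proved, stated in full; the proofs are below) =====
def Claim_equal_partlist : Prop := ∀ (list_ : List String), Dom_partlist list_ → Spec_partlist list_ (partlist list_)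

-- ===== LEMMAS AND PROOFS =====

-- the common recursion both sides reduce to
def pvSpec : String → List String → List (String × String)
  | _, [] => []
  | pre, y :: ys => (pre, PySem.Str.join " " (y :: ys)) :: pvSpec (pre ++ " " ++ y) ys

theorem pv_join_singleton (a : String) : PySem.Str.join " " [a] = a := by
  apply String.toList_inj.mp
  simp [PySem.Str.join, PySem.Chars.join_singleton]

theorem pv_join_cons2 (a b : String) (t : List String) :
    PySem.Str.join " " (a :: b :: t) = a ++ " " ++ PySem.Str.join " " (b :: t) := by
  apply String.toList_inj.mp
  simp [PySem.Str.join, PySem.Chars.join_cons_cons]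

theorem pv_join_append_singleton (pref : List String) (y : String) (hp : pref ≠ []) :
    PySem.Str.join " " (pref ++ [y]) = PySem.Str.join " " pref ++ " " ++ y := by
  induction pref with
  | nil => exact absurd rfl hp
  | cons p t ih =>
    cases t with
    | nil => simp [pv_join_cons2, pv_join_singleton]
    | cons q r =>
      have h1 : ((q :: r) : List String) ≠ [] := by simp
      calc PySem.Str.join " " ((p :: q :: r) ++ [y])
          = p ++ " " ++ PySem.Str.join " " ((q :: r) ++ [y]) := by
            simpa using pv_join_cons2 p q (r ++ [y])
        _ = p ++ " " ++ (PySem.Str.join " " (q :: r) ++ " " ++ y) := by rw [ih h1]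
        _ = PySem.Str.join " " (p :: q :: r) ++ " " ++ y := by
            rw [pv_join_cons2]
            apply String.toList_inj.mp
            simp

theorem pv_sufs_cons (y : String) (ys : List String) :
    pvSufs (y :: ys) = PySem.Str.join " " (y :: ys) :: pvSufs ys := by
  induction ys generalizing y with
  | nil => simp [pvSufs, pv_join_singleton]
  | cons z zs ih =>
    rw [pvSufs, ih z]
    simp [pv_join_cons2]

theorem pv_build_eq_spec (xs : List String) (pre : String) :
    pvBuild pre xs (pvSufs xs) = pvSpec pre xs := by
  induction xs generalizing pre with
  | nil => simp [pvBuild, pvSpec]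
  | cons x xs' ih =>
    rw [pv_sufs_cons, pvBuild, pvSpec, ih]

-- B reduces to pvSpec
theorem pv_alt_eq_spec (list_ : List String) :
    partlist_alt list_ = match list_ with | [] => [] | h :: rest => pvSpec h rest := by
  cases list_ with
  | nil => rfl
  | cons h rest => simp [partlist_alt, pv_build_eq_spec]

-- A's range loop as a map over Nat range, reduced to pvSpec
theorem pv_range_spec (rest : List String) (pref : List String) (hp : pref ≠ []) :
    (List.range rest.length).map (fun k =>
       (PySem.Str.join " " (pref ++ rest.take k), PySem.Str.join " " (rest.drop k)))
    = pvSpec (PySem.Str.join " " pref) rest := by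
  induction rest generalizing pref with
  | nil => simp [pvSpec]
  | cons y ys ih =>
    rw [List.length_cons, List.range_succ_eq_map]
    simp only [List.map_cons, List.map_map]
    rw [pvSpec]
    refine List.cons_eq_cons.mpr ⟨by simp, ?_⟩
    · rw [← pv_join_append_singleton pref y hp, ← ih (pref ++ [y]) (by simp)]
      apply List.map_congr_left
      intro k _
      simp

theorem pv_a_eq_spec (list_ : List String) :
    partlist list_ = match list_ with | [] => [] | h :: rest => pvSpec h rest := by
  cases list_ with
  | nil =>
    simp [partlist, PySem.List.pyRange_one_eq_nil (by norm_num : (0:Int) ≤ 1)]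
  | cons h rest =>
    show (PySem.List.pyRange 1 ((h :: rest).length : Int) 1).foldl _ [] = pvSpec h rest
    rw [PySem.List.foldl_append_singleton_eq_map, List.nil_append, PySem.List.pyRange_one]
    have hn : (((h :: rest).length : Int) - 1).toNat = rest.length := by
      simp
    rw [hn]
    have hmap : ∀ k : Nat,
        (PySem.Str.join " " (PySem.List.slice (h :: rest) none (some (1 + (k : Int)))),
         PySem.Str.join " " (PySem.List.slice (h :: rest) (some (1 + (k : Int))) none))
        = (PySem.Str.join " " ([h] ++ rest.take k), PySem.Str.join " " (rest.drop k)) := by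
      intro k
      have hc : (1 : Int) + (k : Int) = (((k + 1 : Nat)) : Int) := by push_cast; ring
      rw [hc, PySem.List.slice_to_natCast, PySem.List.slice_from_natCast]
      simp
    have hr := pv_range_spec rest [h] (by simp)
    rw [pv_join_singleton] at hr
    rw [← hr, List.map_map]
    apply List.map_congr_left
    intro k _
    exact hmap k

-- ===== VERDICT (by name: the statement is the Claim_ definition above) =====
theorem partlist_spec : Claim_equal_partlist := by
  intro list_ _
  unfold Spec_partlist
  rw [pv_a_eq_spec, pv_alt_eq_spec]
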